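-- pv_equiv track=rewrite | github.com/peixotojeff/tibiatracker.py | xp_calculator.py | find_level_for_exp
-- ===== SOURCE A (Python) =====
-- def cumulative_exp_closed(level: int) -> int:
--     """Calcula XP acumulada até um nível usando fórmula fechada."""
--     if level <= 1:
--         return 0
--     m = level - 1
--     sum_k2 = m * (m + 1) * (2 * m + 1) // 6
--     sum_k = m * (m + 1) // 2
--     return 50 * sum_k2 - 150 * sum_k + 200 * m
--
-- def find_level_for_exp(total_exp: int) -> int:
--     """Encontra o nível atual com base na XP total."""
--     low, high = 1, 2500
--     while low < high:
--         mid = (low + high + 1) // 2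
--         if cumulative_exp_closed(mid) <= total_exp:
--             low = mid
--         else:
--             high = mid - 1
--     return low
-- ===== SOURCE B (Python) =====
-- def find_level_for_exp(total_exp: int) -> int:
--     """Encontra o nível atual com base na XP total (varredura linear incremental)."""
--     level = 1
--     cum = 0  # XP acumulada até `level + 1`, mantida incrementalmente
--     while level < 2500:
--         cum += 50 * level * level - 150 * level + 200
--         if cum > total_exp:
--             break
--         level += 1
--     return level
-- ===== Notes on version B (the rewrite author's own statement) =====
-- stated objective: alternative
-- what changed: Replaced the binary search over [1,2500] calling the closed-form cumulative-XP helper per probe with a single forward scan that maintains the cumulative XP incrementally (adding each level's per-level XP) and stops at the first level whose next cumulative value exceeds total_exp.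
import Mathlib
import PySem

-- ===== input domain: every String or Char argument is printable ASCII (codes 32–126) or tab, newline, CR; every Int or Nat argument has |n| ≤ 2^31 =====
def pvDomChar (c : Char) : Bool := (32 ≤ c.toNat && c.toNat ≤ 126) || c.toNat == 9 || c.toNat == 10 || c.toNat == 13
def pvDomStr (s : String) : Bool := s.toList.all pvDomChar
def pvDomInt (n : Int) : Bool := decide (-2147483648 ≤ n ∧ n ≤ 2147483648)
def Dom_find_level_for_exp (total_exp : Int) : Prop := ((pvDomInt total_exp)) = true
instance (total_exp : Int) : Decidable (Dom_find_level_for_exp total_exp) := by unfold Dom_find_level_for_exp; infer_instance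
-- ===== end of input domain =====

-- B replaces A's binary search by a linear scan that maintains the cumulative XP
-- incrementally (objective: alternative — a genuinely different algorithm of similar cost).

-- ===== PORT A =====
def cumulative_exp_closed (level : Int) : Int :=
  if level ≤ 1 then 0
  else
    let m := level - 1
    let sum_k2 := PySem.Int.floordiv (m * (m + 1) * (2 * m + 1)) 6
    let sum_k := PySem.Int.floordiv (m * (m + 1)) 2
    50 * sum_k2 - 150 * sum_k + 200 * m

-- the `while low < high` loop of A; the Nat argument is fuel that only guards
-- totality (high - low bounds the iteration count, so fuel 2499 is never exhausted)
def pvBsLoop (total_exp : Int) : Nat → Int → Int → Int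
  | 0, low, _ => low
  | n + 1, low, high =>
    if low < high then
      let mid := PySem.Int.floordiv (low + high + 1) 2
      if cumulative_exp_closed mid ≤ total_exp then pvBsLoop total_exp n mid high
      else pvBsLoop total_exp n low (mid - 1)
    else low

def find_level_for_exp (total_exp : Int) : Int := pvBsLoop total_exp 2499 1 2500

-- ===== PORT B =====
-- the `while level < 2500` loop of B: `cum` is the running cumulative XP; the Nat
-- argument is fuel that only guards totality (2500 - level bounds the iterations)
def pvLinLoop (total_exp : Int) : Nat → Int → Int → Int
  | 0, level, _ => level
  | n + 1, level, cum =>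
    if level < 2500 then
      let cum' := cum + (50 * level * level - 150 * level + 200)
      if cum' > total_exp then level
      else pvLinLoop total_exp n (level + 1) cum'
    else level

def find_level_for_exp_alt (total_exp : Int) : Int := pvLinLoop total_exp 2499 1 0

-- ===== PRECONDITION & SPEC =====
def Spec_find_level_for_exp (total_exp : Int) (out : Int) : Prop := out = find_level_for_exp_alt total_exp
instance (total_exp : Int) (out : Int) : Decidable (Spec_find_level_for_exp total_exp out) := by unfold Spec_find_level_for_exp; infer_instance

-- ===== CLAIM (what is proved, stated in full; the proofs are below) =====
def Claim_equal_find_level_for_exp : Prop := ∀ (total_exp : Int), Dom_find_level_for_exp total_exp → Spec_find_level_for_exp total_exp (find_level_for_exp total_exp)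

-- ===== LEMMAS AND PROOFS =====

-- both loops return the unique level r in [1,2500] with (cum r ≤ t or r = 1) and
-- (r = 2500 or cum (r+1) > t)
def pvAnswer (t r : Int) : Prop :=
  (cumulative_exp_closed r ≤ t ∨ r = 1) ∧ 1 ≤ r ∧ r ≤ 2500 ∧
    (r = 2500 ∨ ¬ cumulative_exp_closed (r + 1) ≤ t)

lemma pv_dvd6 (m : Int) : (6 : Int) ∣ m * (m + 1) * (2 * m + 1) := by
  obtain ⟨j, hj⟩ := (Int.even_mul_succ_self m).two_dvd
  have h3 : (3 : Int) ∣ m * (m + 1) * (2 * m + 1) := by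
    obtain ⟨q, hq⟩ : ∃ q, m = 3 * q + m % 3 := ⟨m / 3, by omega⟩
    have hr : m % 3 = 0 ∨ m % 3 = 1 ∨ m % 3 = 2 := by omega
    rcases hr with h | h | h <;> rw [hq, h]
    · exact ⟨q * (3 * q + 1) * (6 * q + 1), by ring⟩
    · exact ⟨(3 * q + 1) * (3 * q + 2) * (2 * q + 1), by ring⟩
    · exact ⟨(3 * q + 2) * (q + 1) * (6 * q + 5), by ring⟩
  obtain ⟨k, hk⟩ := h3
  exact ⟨j * (2 * m + 1) - k, by linear_combination 3 * (2 * m + 1) * hj - 2 * hk⟩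

lemma pv_six_cum (l : Int) (hl : 2 ≤ l) :
    6 * cumulative_exp_closed l =
      50 * ((l - 1) * l * (2 * l - 1)) - 450 * ((l - 1) * l) + 1200 * (l - 1) := by
  rw [show cumulative_exp_closed l =
        50 * PySem.Int.floordiv ((l - 1) * ((l - 1) + 1) * (2 * (l - 1) + 1)) 6 -
          150 * PySem.Int.floordiv ((l - 1) * ((l - 1) + 1)) 2 + 200 * (l - 1) from by
      unfold cumulative_exp_closed; rw [if_neg (by omega)]]
  obtain ⟨k, hk⟩ := pv_dvd6 (l - 1)
  obtain ⟨j, hj⟩ := (Int.even_mul_succ_self (l - 1)).two_dvd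
  have hA : (l - 1) * ((l - 1) + 1) * (2 * (l - 1) + 1) = 6 * k := hk
  have hB : (l - 1) * ((l - 1) + 1) = 2 * j := hj
  rw [hA, hB]
  simp only [PySem.Int.floordiv]
  rw [Int.mul_fdiv_cancel_left k (by norm_num), Int.mul_fdiv_cancel_left j (by norm_num)]
  nlinarith [hA, hB]

lemma pv_cum_step (l : Int) (hl : 1 ≤ l) :
    cumulative_exp_closed (l + 1) =
      cumulative_exp_closed l + (50 * l * l - 150 * l + 200) := by
  rcases eq_or_lt_of_le hl with h | h
  · subst h; decide
  · have h1 := pv_six_cum l (by omega)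
    have h2 := pv_six_cum (l + 1) (by omega)
    have h6 : 6 * cumulative_exp_closed (l + 1) =
        6 * (cumulative_exp_closed l + (50 * l * l - 150 * l + 200)) := by
      linear_combination h2 - h1
    omega

lemma pv_cum_le_succ (l : Int) : cumulative_exp_closed l ≤ cumulative_exp_closed (l + 1) := by
  rcases le_or_gt l 0 with h | h
  · unfold cumulative_exp_closed
    rw [if_pos (by omega), if_pos (by omega)]
  · rw [pv_cum_step l (by omega)]
    nlinarith [sq_nonneg (2 * l - 3)]

lemma pv_cum_mono {a b : Int} (h : a ≤ b) :
    cumulative_exp_closed a ≤ cumulative_exp_closed b := by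
  obtain ⟨n, hn⟩ : ∃ n : ℕ, b = a + n := ⟨(b - a).toNat, by omega⟩
  subst hn
  induction n with
  | zero => simp
  | succ k ih =>
      have : a + (↑(k + 1) : Int) = (a + k) + 1 := by push_cast; ring
      rw [this]
      exact le_trans (ih (by omega)) (pv_cum_le_succ (a + k))

lemma pv_bs_correct (t : Int) :
    ∀ (n : ℕ) (low high : Int), (high - low).toNat ≤ n →
      1 ≤ low → low ≤ high → high ≤ 2500 →
      (cumulative_exp_closed low ≤ t ∨ low = 1) →
      (∀ l, high < l → l ≤ 2500 → ¬ cumulative_exp_closed l ≤ t) →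
      pvAnswer t (pvBsLoop t n low high) := by
  intro n
  induction n with
  | zero =>
    intro low high hn h1 hlh h25 hlow hhigh
    have hEq : low = high := by omega
    rw [pvBsLoop]
    refine ⟨hlow, h1, by omega, ?_⟩
    rcases eq_or_lt_of_le h25 with h | h
    · exact Or.inl (by omega)
    · exact Or.inr (hhigh (low + 1) (by omega) (by omega))
  | succ n ih =>
    intro low high hn h1 hlh h25 hlow hhigh
    rw [pvBsLoop]
    split_ifs with hlt
    · have hmid : PySem.Int.floordiv (low + high + 1) 2 = (low + high + 1) / 2 :=
        PySem.Int.floordiv_eq_ediv_of_pos (by norm_num)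
      set mid := PySem.Int.floordiv (low + high + 1) 2 with hm
      have hb1 : low < mid := by omega
      have hb2 : mid ≤ high := by omega
      by_cases hc : cumulative_exp_closed mid ≤ t
      · rw [if_pos hc]
        exact ih mid high (by omega) (by omega) hb2 h25 (Or.inl hc) hhigh
      · rw [if_neg hc]
        refine ih low (mid - 1) (by omega) h1 (by omega) (by omega) hlow ?_
        intro l hl hl2
        rcases le_or_gt l high with hcase | hcase
        · intro hle
          exact hc (le_trans (pv_cum_mono (by omega : mid ≤ l)) hle)
        · exact hhigh l hcase hl2
    · have : low = high := by omega
      refine ⟨hlow, h1, by omega, ?_⟩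
      rcases eq_or_lt_of_le h25 with h | h
      · exact Or.inl (by omega)
      · exact Or.inr (hhigh (low + 1) (by omega) (by omega))

lemma pv_lin_correct (t : Int) :
    ∀ (n : ℕ) (level c : Int), (2500 - level).toNat ≤ n →
      1 ≤ level → level ≤ 2500 →
      c = cumulative_exp_closed level →
      (cumulative_exp_closed level ≤ t ∨ level = 1) →
      pvAnswer t (pvLinLoop t n level c) := by
  intro n
  induction n with
  | zero =>
    intro level c hn h1 h25 hc hP
    have : level = 2500 := by omega
    rw [pvLinLoop]
    exact ⟨hP, h1, by omega, Or.inl this⟩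
  | succ n ih =>
    intro level c hn h1 h25 hc hP
    rw [pvLinLoop]
    split_ifs with hlt
    · have hstep : c + (50 * level * level - 150 * level + 200) =
          cumulative_exp_closed (level + 1) := by
        rw [hc, ← pv_cum_step level h1]
      by_cases hgt : c + (50 * level * level - 150 * level + 200) > t
      · rw [if_pos hgt]
        exact ⟨hP, h1, by omega, Or.inr (by rw [← hstep]; omega)⟩
      · rw [if_neg hgt]
        exact ih (level + 1) _ (by omega) (by omega) (by omega) hstep
          (Or.inl (by rw [← hstep]; omega))
    · have : level = 2500 := by omega
      exact ⟨hP, h1, by omega, Or.inl this⟩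

lemma pv_answer_unique {t r1 r2 : Int} (h1 : pvAnswer t r1) (h2 : pvAnswer t r2) :
    r1 = r2 := by
  obtain ⟨hP1, hlo1, hhi1, hnext1⟩ := h1
  obtain ⟨hP2, hlo2, hhi2, hnext2⟩ := h2
  by_contra hne
  have key : ∀ a b : Int, a < b →
      (cumulative_exp_closed b ≤ t ∨ b = 1) → 1 ≤ a → b ≤ 2500 →
      (a = 2500 ∨ ¬ cumulative_exp_closed (a + 1) ≤ t) → False := by
    intro a b hab hPb ha hb hnexta
    have hb1 : b ≠ 1 := by omega
    have hPb' : cumulative_exp_closed b ≤ t := hPb.resolve_right hb1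
    have hna : ¬ cumulative_exp_closed (a + 1) ≤ t := by
      rcases hnexta with h | h
      · omega
      · exact h
    exact hna (le_trans (pv_cum_mono (by omega : a + 1 ≤ b)) hPb')
  rcases lt_or_gt_of_ne hne with h | h
  · exact key r1 r2 h hP2 hlo1 hhi2 hnext1
  · exact key r2 r1 h hP1 hlo2 hhi1 hnext2

-- ===== VERDICT (by name: the statement is the Claim_ definition above) =====
theorem find_level_for_exp_spec : Claim_equal_find_level_for_exp := by
  intro t _
  unfold Spec_find_level_for_exp find_level_for_exp find_level_for_exp_alt
  have hA : pvAnswer t (pvBsLoop t 2499 1 2500) :=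
    pv_bs_correct t 2499 1 2500 (by decide) (by norm_num) (by norm_num) (by norm_num)
      (Or.inr rfl) (by intro l hl hl2; omega)
  have hB : pvAnswer t (pvLinLoop t 2499 1 0) :=
    pv_lin_correct t 2499 1 0 (by decide) (by norm_num) (by norm_num) (by decide)
      (Or.inr rfl)
  exact pv_answer_unique hA hB
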